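-- pv_equiv track=rewrite | github.com/Achlys2004/CommServe | backend/utils/code_validator.py | fix_fstring_issues
-- ===== SOURCE A (Python) =====
-- def fix_fstring_issues(code: str) -> str:
--     """
--     Fix common f-string issues like multiline expressions.
--     """
--     lines = code.split("\n")
--     fixed_lines = []
--     in_fstring = False
--     fstring_start = ""
--
--     for line in lines:
--         stripped = line.strip()
--
--         # Check if this line starts an f-string
--         if ('f"' in line or "f'" in line) and not in_fstring:
--             # Count quotes to see if f-string is properly closed on same line
--             if ('f"' in line and line.count('"') % 2 == 0) or (
--                 "f'" in line and line.count("'") % 2 == 0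
--             ):
--                 # F-string is properly closed on same line
--                 fixed_lines.append(line)
--             else:
--                 # F-string spans multiple lines
--                 in_fstring = True
--                 fstring_start = line
--                 continue
--         elif in_fstring:
--             # We're in a multiline f-string, look for the closing quote
--             if ('"' in line and fstring_start.count('"') > 0) or (
--                 "'" in line and fstring_start.count("'") > 0
--             ):
--                 # Found closing quote, combine the lines
--                 combined = fstring_start.rstrip() + " " + line.lstrip()
--                 fixed_lines.append(combined)
--                 in_fstring = False
--             else:
--                 # Still in f-string, combine with previous
--                 fstring_start = fstring_start.rstrip() + " " + line.lstrip()
--         else: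
--             fixed_lines.append(line)
--
--     # If still in f-string at end, add closing quote
--     if in_fstring:
--         if 'f"' in fstring_start:
--             fixed_lines.append(fstring_start + '"')
--         elif "f'" in fstring_start:
--             fixed_lines.append(fstring_start + "'")
--
--     return "\n".join(fixed_lines)
-- ===== SOURCE B (Python) =====
-- def _opens_unclosed(line):
--     """Line starts an f-string that is not closed on the same line."""
--     if 'f"' not in line and "f'" not in line:
--         return False
--     return not (('f"' in line and line.count('"') % 2 == 0)
--                 or ("f'" in line and line.count("'") % 2 == 0))
--
--
-- def _segment(lines):
--     """Stage 1: group the lines.  Each group is (its lines, still-open-at-EOF).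
--     Only integer quote counters are carried while grouping; no string is built."""
--     groups = []
--     pending = None  # (group_lines, double_quote_count, single_quote_count)
--     for line in lines:
--         if pending is None:
--             if _opens_unclosed(line):
--                 pending = ([line], line.count('"'), line.count("'"))
--             else:
--                 groups.append(([line], False))
--         else:
--             glines, dq, sq = pending
--             if ('"' in line and dq > 0) or ("'" in line and sq > 0):
--                 groups.append((glines + [line], False))
--                 pending = None
--             else:
--                 pending = (glines + [line], dq + line.count('"'),
--                            sq + line.count("'"))
--     if pending is not None:
--         groups.append((pending[0], True))
--     return groups
--
--
-- def _render(glines, open_at_eof):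
--     """Stage 2: merge one group into its output line (None = nothing to emit)."""
--     merged = glines[0]
--     for extra in glines[1:]:
--         merged = merged.rstrip() + " " + extra.lstrip()
--     if not open_at_eof:
--         return merged
--     if any('f"' in l for l in glines):
--         return merged + '"'
--     if any("f'" in l for l in glines):
--         return merged + "'"
--     return None
--
--
-- def fix_fstring_issues(code: str) -> str:
--     rendered = (_render(g, o) for g, o in _segment(code.split("\n")))
--     return "\n".join(l for l in rendered if l is not None)
-- ===== Notes on version B (the rewrite author's own statement) =====
-- stated objective: alternative
-- what changed: Replaced A's single-pass flag+accumulator state machine by two staged passes: a segmentation pass that groups the lines carrying only integer quote counters (no string is built while deciding where groups end), then a rendering pass that merges each group with rstrip/lstrip and picks the EOF closing quote by scanning the group's lines.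
import Mathlib
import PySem

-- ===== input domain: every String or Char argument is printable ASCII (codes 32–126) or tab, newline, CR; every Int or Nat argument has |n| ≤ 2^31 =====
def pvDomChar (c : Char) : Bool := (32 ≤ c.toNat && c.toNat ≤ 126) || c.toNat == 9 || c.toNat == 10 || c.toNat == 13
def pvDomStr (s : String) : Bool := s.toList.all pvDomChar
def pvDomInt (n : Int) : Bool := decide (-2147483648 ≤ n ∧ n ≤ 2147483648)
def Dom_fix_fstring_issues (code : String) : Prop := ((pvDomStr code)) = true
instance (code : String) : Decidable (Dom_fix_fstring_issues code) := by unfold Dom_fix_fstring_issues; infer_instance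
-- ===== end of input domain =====

-- B replaces A's single-pass flag+accumulator state machine by two staged passes: a grouping
-- pass that carries only integer quote counters, then a rendering pass that merges each group
-- (objective: alternative; same asymptotic cost).

-- ===== PORT A =====
-- A's loop body: state = (fixed_lines, in_fstring, fstring_start)
def pvAStep (st : List String × Bool × String) (line : String) : List String × Bool × String :=
  let fixed := st.1
  let inF := st.2.1
  let fstart := st.2.2
  if (PySem.Str.isIn "f\"" line || PySem.Str.isIn "f'" line) && !inF then
    if (PySem.Str.isIn "f\"" line && PySem.Str.count line "\"" % 2 == 0) ||
       (PySem.Str.isIn "f'" line && PySem.Str.count line "'" % 2 == 0) then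
      (fixed ++ [line], inF, fstart)
    else
      (fixed, true, line)
  else if inF then
    if (PySem.Str.isIn "\"" line && PySem.Str.count fstart "\"" > 0) ||
       (PySem.Str.isIn "'" line && PySem.Str.count fstart "'" > 0) then
      (fixed ++ [PySem.Str.rstrip fstart ++ " " ++ PySem.Str.lstrip line], false, fstart)
    else
      (fixed, inF, PySem.Str.rstrip fstart ++ " " ++ PySem.Str.lstrip line)
  else
    (fixed ++ [line], inF, fstart)

-- A's post-loop fixup: if still in f-string, append the start with a closing quote
def pvAEpilogue (st : List String × Bool × String) : List String :=
  if st.2.1 then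
    if PySem.Str.isIn "f\"" st.2.2 then st.1 ++ [st.2.2 ++ "\""]
    else if PySem.Str.isIn "f'" st.2.2 then st.1 ++ [st.2.2 ++ "'"]
    else st.1
  else st.1

def fix_fstring_issues (code : String) : String :=
  PySem.Str.join "\n"
    (pvAEpilogue (((PySem.Str.split? code "\n").getD []).foldl pvAStep ([], false, "")))

-- ===== PORT B =====
-- Source B's merged.rstrip() + " " + extra.lstrip()
def pvMerge (a b : String) : String := PySem.Str.rstrip a ++ " " ++ PySem.Str.lstrip b

-- Source B's _opens_unclosed
def pvOpensUnclosed (line : String) : Bool :=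
  if !PySem.Str.isIn "f\"" line && !PySem.Str.isIn "f'" line then false
  else !((PySem.Str.isIn "f\"" line && PySem.Str.count line "\"" % 2 == 0) ||
         (PySem.Str.isIn "f'" line && PySem.Str.count line "'" % 2 == 0))

-- Source B's _segment loop body: state = (groups, pending = (group_lines, dq, sq))
def pvSegStep (st : List (List String × Bool) × Option (List String × Nat × Nat))
    (line : String) : List (List String × Bool) × Option (List String × Nat × Nat) :=
  match st with
  | (groups, none) =>
    if pvOpensUnclosed line then
      (groups, some ([line], PySem.Str.count line "\"", PySem.Str.count line "'"))
    else (groups ++ [([line], false)], none)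
  | (groups, some (glines, dq, sq)) =>
    if (PySem.Str.isIn "\"" line && dq > 0) || (PySem.Str.isIn "'" line && sq > 0) then
      (groups ++ [(glines ++ [line], false)], none)
    else
      (groups, some (glines ++ [line], dq + PySem.Str.count line "\"",
        sq + PySem.Str.count line "'"))

-- Source B's _segment post-loop: flush a still-open pending group
def pvSegFinish (st : List (List String × Bool) × Option (List String × Nat × Nat)) :
    List (List String × Bool) :=
  match st.2 with
  | none => st.1
  | some p => st.1 ++ [(p.1, true)]

def pvSegment (lines : List String) : List (List String × Bool) :=
  pvSegFinish (lines.foldl pvSegStep ([], none))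

-- Source B's _render (none = unreachable empty group, where glines[0] would raise)
def pvRender : List String × Bool → Option String
  | ([], _) => none
  | (first :: rest, openEof) =>
    let merged := rest.foldl pvMerge first
    if !openEof then some merged
    else if (first :: rest).any (fun l => PySem.Str.isIn "f\"" l) then some (merged ++ "\"")
    else if (first :: rest).any (fun l => PySem.Str.isIn "f'" l) then some (merged ++ "'")
    else none

def fix_fstring_issues_alt (code : String) : String :=
  PySem.Str.join "\n" ((pvSegment ((PySem.Str.split? code "\n").getD [])).filterMap pvRender)

-- ===== PRECONDITION & SPEC =====
def Spec_fix_fstring_issues (code : String) (out : String) : Prop := out = fix_fstring_issues_alt code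
instance (code : String) (out : String) : Decidable (Spec_fix_fstring_issues code out) := by unfold Spec_fix_fstring_issues; infer_instance

-- ===== CLAIM (what is proved, stated in full; the proofs are below) =====
def Claim_equal_fix_fstring_issues : Prop := ∀ (code : String), Dom_fix_fstring_issues code → Spec_fix_fstring_issues code (fix_fstring_issues code)

-- ===== LEMMAS AND PROOFS =====

-- PySem.Chars.count for a single-character needle is List.count
theorem pvGoLem (c : Char) : ∀ (l : List Char) (f acc : Nat), l.length ≤ f →
    PySem.Chars.count.go [c] f l acc = acc + l.count c := by
  intro l
  induction l with
  | nil => intro f acc _; cases f <;> simp [PySem.Chars.count.go]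
  | cons a t ih =>
    intro f acc hf
    cases f with
    | zero => simp at hf
    | succ f =>
      simp only [List.length_cons, Nat.add_le_add_iff_right] at hf
      simp only [PySem.Chars.count.go, List.isPrefixOf, Bool.and_true, List.count_cons]
      by_cases hc : c = a
      · subst hc
        rw [if_pos (by simp)]
        simp only [List.length_cons, List.length_nil, List.drop_succ_cons, List.drop_zero,
          ih f (acc+1) hf]
        simp; omega
      · rw [if_neg (by simpa using hc), ih f acc hf]
        simp [Ne.symm hc]

theorem pvCntSingle (s : List Char) (c : Char) : PySem.Chars.count s [c] = s.count c := by
  simp [PySem.Chars.count, pvGoLem c s s.length 0 le_rfl]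

theorem pvRstripDecomp (a : List Char) :
    ∃ w, a = PySem.Chars.rstrip a ++ w ∧ ∀ c ∈ w, PySem.Chars.isspace c = true := by
  refine ⟨(a.reverse.takeWhile PySem.Chars.isspace).reverse, ?_, ?_⟩
  · rw [PySem.Chars.rstrip, ← List.reverse_append,
      List.takeWhile_append_dropWhile, List.reverse_reverse]
  · intro c hc
    exact List.mem_takeWhile_imp (List.mem_reverse.mp hc)

theorem pvLstripDecomp (a : List Char) :
    ∃ w, a = w ++ PySem.Chars.lstrip a ∧ ∀ c ∈ w, PySem.Chars.isspace c = true := by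
  refine ⟨a.takeWhile PySem.Chars.isspace, ?_, fun c hc => List.mem_takeWhile_imp hc⟩
  rw [PySem.Chars.lstrip, List.takeWhile_append_dropWhile]

theorem pvPrefixOfAppendSep {p x y : List Char} {c : Char} (hc : c ∉ p)
    (h : p <+: x ++ c :: y) : p <+: x := by
  induction p generalizing x with
  | nil => exact List.nil_prefix
  | cons d p' ih =>
    cases x with
    | nil =>
      rcases List.cons_prefix_cons.mp h with ⟨rfl, _⟩
      exact absurd (List.mem_cons_self) hc
    | cons a x' =>
      rcases List.cons_prefix_cons.mp h with ⟨rfl, h2⟩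
      exact List.cons_prefix_cons.mpr ⟨rfl, ih (fun hm => hc (List.mem_cons_of_mem _ hm)) h2⟩

-- a needle avoiding c matches x ++ c :: y exactly where it matches x or y
theorem pvInfixSplit {p : List Char} {c : Char} (hc : c ∉ p) :
    ∀ x y : List Char, (p <:+: x ++ c :: y ↔ p <:+: x ∨ p <:+: y) := by
  intro x
  induction x with
  | nil =>
    intro y
    simp only [List.nil_append]
    rw [List.infix_cons_iff]
    constructor
    · rintro (hp | hi)
      · cases p with
        | nil => exact Or.inl (List.nil_infix)
        | cons d p' =>
          rcases List.cons_prefix_cons.mp hp with ⟨rfl, _⟩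
          exact absurd List.mem_cons_self hc
      · exact Or.inr hi
    · rintro (hx | hy)
      · rw [List.infix_nil] at hx; subst hx; exact Or.inl List.nil_prefix
      · exact Or.inr hy
  | cons a x' ih =>
    intro y
    rw [List.cons_append, List.infix_cons_iff, List.infix_cons_iff, ih y]
    constructor
    · rintro (hp | hx' | hy)
      · exact Or.inl (Or.inl (pvPrefixOfAppendSep hc hp))
      · exact Or.inl (Or.inr hx')
      · exact Or.inr hy
    · rintro ((hp | hx') | hy)
      · exact Or.inl (hp.trans (List.prefix_append _ _))
      · exact Or.inr (Or.inl hx')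
      · exact Or.inr (Or.inr hy)

theorem pvNotmemOfSpacefree {p : List Char} {c : Char}
    (hsp : ∀ d ∈ p, PySem.Chars.isspace d = false) (hc : PySem.Chars.isspace c = true) :
    c ∉ p := fun hm => by simp [hsp c hm] at hc

theorem pvInfixSpacesRight {p : List Char} (hne : p ≠ [])
    (hsp : ∀ d ∈ p, PySem.Chars.isspace d = false) :
    ∀ {w : List Char}, (∀ c ∈ w, PySem.Chars.isspace c = true) →
      ∀ x, (p <:+: x ++ w ↔ p <:+: x) := by
  intro w
  induction w with
  | nil => intro _ x; simp
  | cons c w' ih =>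
    intro hw x
    rw [pvInfixSplit (pvNotmemOfSpacefree hsp (hw c List.mem_cons_self)) x w']
    constructor
    · rintro (hx | hw')
      · exact hx
      · have := (ih (fun d hd => hw d (List.mem_cons_of_mem _ hd)) []).mp (by simpa using hw')
        rw [List.infix_nil] at this; exact absurd this hne
    · exact Or.inl

theorem pvInfixSpacesLeft {p : List Char} (hne : p ≠ [])
    (hsp : ∀ d ∈ p, PySem.Chars.isspace d = false) :
    ∀ {w : List Char}, (∀ c ∈ w, PySem.Chars.isspace c = true) →
      ∀ x, (p <:+: w ++ x ↔ p <:+: x) := by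
  intro w
  induction w with
  | nil => intro _ x; simp
  | cons c w' ih =>
    intro hw x
    have h0 : p <:+: [] ++ c :: (w' ++ x) ↔ p <:+: [] ∨ p <:+: w' ++ x :=
      pvInfixSplit (pvNotmemOfSpacefree hsp (hw c List.mem_cons_self)) [] (w' ++ x)
    simp only [List.nil_append] at h0
    rw [List.cons_append, h0, ih (fun d hd => hw d (List.mem_cons_of_mem _ hd)) x]
    constructor
    · rintro (hnil | hx)
      · rw [List.infix_nil] at hnil; exact absurd hnil hne
      · exact hx
    · exact Or.inr

-- count of a non-space character distributes over the rstrip/space/lstrip merge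
theorem pvCntMerge (a b q : String) (c : Char) (hq : q.toList = [c])
    (hc : PySem.Chars.isspace c = false) :
    PySem.Str.count (pvMerge a b) q = PySem.Str.count a q + PySem.Str.count b q := by
  obtain ⟨wa, ha, hwa⟩ := pvRstripDecomp a.toList
  obtain ⟨wb, hb, hwb⟩ := pvLstripDecomp b.toList
  simp only [PySem.Str.count, pvMerge, String.toList_append, PySem.Str.toList_rstrip,
    PySem.Str.toList_lstrip, hq, pvCntSingle]
  have hwa0 : wa.count c = 0 :=
    List.count_eq_zero.mpr (fun hm => by simp [hwa c hm] at hc)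
  have hwb0 : wb.count c = 0 :=
    List.count_eq_zero.mpr (fun hm => by simp [hwb c hm] at hc)
  have hc' : ¬ (' ' = c) := fun h => by subst h; simp [PySem.Chars.isspace] at hc
  conv_rhs => rw [ha, hb]
  simp [List.count_append, hwa0, hwb0, hc']

-- membership of a space-free needle distributes over the merge
theorem pvIsInMerge (a b q : String) (hne : q.toList ≠ [])
    (hsp : ∀ d ∈ q.toList, PySem.Chars.isspace d = false) :
    PySem.Str.isIn q (pvMerge a b) = (PySem.Str.isIn q a || PySem.Str.isIn q b) := by
  obtain ⟨wa, ha, hwa⟩ := pvRstripDecomp a.toList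
  obtain ⟨wb, hb, hwb⟩ := pvLstripDecomp b.toList
  apply Bool.eq_iff_iff.mpr
  have hmerge : (pvMerge a b).toList
      = PySem.Chars.rstrip a.toList ++ ' ' :: PySem.Chars.lstrip b.toList := by
    simp [pvMerge, String.toList_append]
  constructor
  · intro h
    have h1 := (PySem.Str.isIn_iff_infix _ _).mp h
    rw [hmerge] at h1
    rcases (pvInfixSplit (pvNotmemOfSpacefree hsp (by simp [PySem.Chars.isspace])) _ _).mp h1 with hx | hy
    · have : q.toList <:+: a.toList := by
        rw [ha]; exact hx.trans (List.prefix_append _ _).isInfix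
      rw [(PySem.Str.isIn_iff_infix q a).mpr this]; simp
    · have : q.toList <:+: b.toList := by
        rw [hb]; exact hy.trans (List.suffix_append _ _).isInfix
      rw [(PySem.Str.isIn_iff_infix q b).mpr this]; simp
  · intro h
    rcases Bool.or_eq_true_iff.mp h with h1 | h1 <;> rw [PySem.Str.isIn_iff_infix _ _] at h1 ⊢ <;> rw [hmerge]
    · rw [ha] at h1
      rw [pvInfixSplit (pvNotmemOfSpacefree hsp (by simp [PySem.Chars.isspace])) _ _]
      exact Or.inl ((pvInfixSpacesRight hne hsp hwa _).mp h1)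
    · rw [hb] at h1
      rw [pvInfixSplit (pvNotmemOfSpacefree hsp (by simp [PySem.Chars.isspace])) _ _]
      exact Or.inr ((pvInfixSpacesLeft hne hsp hwb _).mp h1)

-- membership of a space-free needle in the merged group = any over its lines
theorem pvIsInFold (q : String) (hne : q.toList ≠ [])
    (hsp : ∀ d ∈ q.toList, PySem.Chars.isspace d = false) :
    ∀ (gr : List String) (g0 : String),
      PySem.Str.isIn q (gr.foldl pvMerge g0)
        = (PySem.Str.isIn q g0 || gr.any (fun l => PySem.Str.isIn q l)) := by
  intro gr
  induction gr with
  | nil => intro g0; simp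
  | cons a gr' ih =>
    intro g0
    simp only [List.foldl_cons, ih (pvMerge g0 a), pvIsInMerge g0 a q hne hsp, List.any_cons]
    simp [Bool.or_assoc]

-- the two quote needles are space-free singletons ("f-needles": nonempty, space-free)
theorem pvDQList : ("\"" : String).toList = ['"'] := rfl
theorem pvSQList : ("'" : String).toList = ['\''] := rfl
theorem pvFDne : ("f\"" : String).toList ≠ [] := by simp
theorem pvFDsp : ∀ d ∈ ("f\"" : String).toList, PySem.Chars.isspace d = false := by
  rw [show ("f\"" : String).toList = ['f', '"'] from rfl]
  intro d hd
  fin_cases hd <;> rfl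
theorem pvFSne : ("f'" : String).toList ≠ [] := by simp
theorem pvFSsp : ∀ d ∈ ("f'" : String).toList, PySem.Chars.isspace d = false := by
  rw [show ("f'" : String).toList = ['f', '\''] from rfl]
  intro d hd
  fin_cases hd <;> rfl

-- the grouping invariant: A's fold + epilogue, started with the rendering of B's
-- closed groups, equals the rendering of B's segmentation from the matching state
set_option maxHeartbeats 1000000 in
theorem pvInv (lines : List String) :
    (∀ (gs : List (List String × Bool)) (fs : String),
      pvAEpilogue (lines.foldl pvAStep (gs.filterMap pvRender, false, fs))
        = (pvSegFinish (lines.foldl pvSegStep (gs, none))).filterMap pvRender)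
    ∧ (∀ (gs : List (List String × Bool)) (g0 : String) (gr : List String),
      pvAEpilogue (lines.foldl pvAStep (gs.filterMap pvRender, true, gr.foldl pvMerge g0))
        = (pvSegFinish (lines.foldl pvSegStep
            (gs, some (g0 :: gr, PySem.Str.count (gr.foldl pvMerge g0) "\"",
              PySem.Str.count (gr.foldl pvMerge g0) "'")))).filterMap pvRender) := by
  induction lines with
  | nil =>
    constructor
    · intro gs fs
      simp [pvAEpilogue, pvSegFinish]
    · intro gs g0 gr
      have h1 : (g0 :: gr).any (fun l => PySem.Str.isIn "f\"" l)
          = PySem.Str.isIn "f\"" (gr.foldl pvMerge g0) := by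
        rw [pvIsInFold "f\"" pvFDne pvFDsp gr g0, List.any_cons]
      have h2 : (g0 :: gr).any (fun l => PySem.Str.isIn "f'" l)
          = PySem.Str.isIn "f'" (gr.foldl pvMerge g0) := by
        rw [pvIsInFold "f'" pvFSne pvFSsp gr g0, List.any_cons]
      have hone : List.filterMap pvRender [(g0 :: gr, true)]
          = (pvRender (g0 :: gr, true)).toList := by
        cases h : pvRender (g0 :: gr, true) <;> simp [h]
      have hr : pvRender (g0 :: gr, true)
          = (if PySem.Str.isIn "f\"" (gr.foldl pvMerge g0) then
               some (gr.foldl pvMerge g0 ++ "\"")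
             else if PySem.Str.isIn "f'" (gr.foldl pvMerge g0) then
               some (gr.foldl pvMerge g0 ++ "'")
             else none) := by
        rw [← h1, ← h2]
        simp [pvRender]
      rw [List.foldl_nil, List.foldl_nil]
      show pvAEpilogue (gs.filterMap pvRender, true, gr.foldl pvMerge g0)
          = (pvSegFinish (gs, some (g0 :: gr, _, _))).filterMap pvRender
      have hfin : pvSegFinish (gs, some (g0 :: gr,
            PySem.Str.count (gr.foldl pvMerge g0) "\"",
            PySem.Str.count (gr.foldl pvMerge g0) "'"))
          = gs ++ [(g0 :: gr, true)] := rfl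
      rw [hfin, List.filterMap_append, hone, hr]
      unfold pvAEpilogue
      cases hfd : PySem.Str.isIn "f\"" (gr.foldl pvMerge g0) <;>
        cases hfs2 : PySem.Str.isIn "f'" (gr.foldl pvMerge g0) <;> simp
  | cons line rest ih =>
    constructor
    · intro gs fs
      simp only [List.foldl_cons, pvAStep, pvSegStep, pvOpensUnclosed]
      rcases Bool.eq_false_or_eq_true (PySem.Str.isIn "f\"" line) with ha | ha <;>
      rcases Bool.eq_false_or_eq_true (PySem.Str.isIn "f'" line) with hb | hb <;>
      rcases Bool.eq_false_or_eq_true (PySem.Str.count line "\"" % 2 == 0) with hd | hd <;>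
      rcases Bool.eq_false_or_eq_true (PySem.Str.count line "'" % 2 == 0) with he | he <;>
        simp only [ha, hb, hd, he, Bool.or_false, Bool.or_true, Bool.and_true,
          Bool.and_false, Bool.not_true, Bool.not_false, Bool.or_self,
          Bool.false_eq_true, if_true, if_false] <;>
        first
          | exact ih.2 gs line []
          | (rw [show gs.filterMap pvRender ++ [line]
                  = (gs ++ [([line], false)]).filterMap pvRender from by
                simp [List.filterMap_append, pvRender]]
             exact ih.1 (gs ++ [([line], false)]) fs)
    · intro gs g0 gr
      simp only [List.foldl_cons, pvAStep, pvSegStep]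
      rcases Bool.eq_false_or_eq_true ((PySem.Str.isIn "\"" line &&
            decide (PySem.Str.count (gr.foldl pvMerge g0) "\"" > 0)) ||
          (PySem.Str.isIn "'" line &&
            decide (PySem.Str.count (gr.foldl pvMerge g0) "'" > 0))) with hc | hc <;>
        simp only [hc, Bool.not_true, Bool.and_false, Bool.false_eq_true,
          if_true, if_false]
      · -- closing line found: group is flushed
        rw [show gs.filterMap pvRender
              ++ [PySem.Str.rstrip (gr.foldl pvMerge g0) ++ " " ++ PySem.Str.lstrip line]
            = (gs ++ [(g0 :: (gr ++ [line]), false)]).filterMap pvRender from by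
          simp [List.filterMap_append, pvRender, List.foldl_append, pvMerge]]
        exact ih.1 (gs ++ [(g0 :: (gr ++ [line]), false)]) (gr.foldl pvMerge g0)
      · -- still open: continue accumulating
        have h2 := ih.2 gs g0 (gr ++ [line])
        simp only [List.foldl_append, List.foldl_cons, List.foldl_nil] at h2
        rw [pvCntMerge (gr.foldl pvMerge g0) line "\"" '"' pvDQList (by decide),
          pvCntMerge (gr.foldl pvMerge g0) line "'" '\'' pvSQList (by decide)] at h2
        exact h2

-- ===== VERDICT (by name: the statement is the Claim_ definition above) =====
theorem fix_fstring_issues_spec : Claim_equal_fix_fstring_issues := by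
  intro code _
  unfold Spec_fix_fstring_issues fix_fstring_issues fix_fstring_issues_alt pvSegment
  have h := (pvInv ((PySem.Str.split? code "\n").getD [])).1 [] ""
  simp only [List.filterMap_nil] at h
  exact congrArg (PySem.Str.join "\n") h
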